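-- pv_equiv track=rewrite | github.com/biniter1/Report_219 | Report_3_code.py | hill_encrypt
-- ===== SOURCE A (Python) =====
-- import string
--
-- def hill_encrypt(plaintext, key_matrix):
--     plaintext = plaintext.upper()
--     letters = [char for char in plaintext if char in string.ascii_uppercase]
--     while len(letters) % 3 != 0:
--         letters.append('X')
--
--     ciphertext = ""
--     letter_idx = 0
--     for char in plaintext:
--         if char not in string.ascii_uppercase:
--             ciphertext += char
--         else:
--             if letter_idx % 3 == 0:
--                 block = letters[letter_idx: letter_idx+3]
--                 block_vector = [ord(block[i]) - ord('A') for i in range(3)]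
--                 encrypted_vector = [(sum(key_matrix[i][j] * block_vector[j] for j in range(3))) % 26 for i in range(3)]
--                 cipher_block = "".join(chr(num + ord('A')) for num in encrypted_vector)
--                 ciphertext += cipher_block
--             letter_idx += 1
--     return ciphertext
-- ===== SOURCE B (Python) =====
-- import string
--
-- def _enc_block(block, key_matrix):
--     return ''.join(
--         chr(sum(key_matrix[i][j] * (ord(block[j]) - 65) for j in range(3)) % 26 + 65)
--         for i in range(3))
--
-- def _enc_all(letters, key_matrix):
--     if not letters:
--         return ''
--     return _enc_block(letters[:3], key_matrix) + _enc_all(letters[3:], key_matrix)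
--
-- def hill_encrypt(plaintext, key_matrix):
--     up = plaintext.upper()
--     letters = [c for c in up if c in string.ascii_uppercase]
--     letters += ['X'] * (-len(letters) % 3)
--     enc = _enc_all(letters, key_matrix)
--     out = []
--     idx = 0
--     for ch in up:
--         if ch in string.ascii_uppercase:
--             if idx % 3 == 0:
--                 out.append(enc[idx:idx + 3])
--             idx += 1
--         else:
--             out.append(ch)
--     return ''.join(out)
-- ===== Notes on version B (the rewrite author's own statement) =====
-- stated objective: simpler
-- what changed: B splits A's single inline loop into two plain passes - encrypt the padded letter string block by block (closed-form X-padding instead of a while loop, a recursive block encoder), then re-interleave the precomputed cipher text with the non-letters - same arithmetic, different decomposition.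
import Mathlib
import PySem

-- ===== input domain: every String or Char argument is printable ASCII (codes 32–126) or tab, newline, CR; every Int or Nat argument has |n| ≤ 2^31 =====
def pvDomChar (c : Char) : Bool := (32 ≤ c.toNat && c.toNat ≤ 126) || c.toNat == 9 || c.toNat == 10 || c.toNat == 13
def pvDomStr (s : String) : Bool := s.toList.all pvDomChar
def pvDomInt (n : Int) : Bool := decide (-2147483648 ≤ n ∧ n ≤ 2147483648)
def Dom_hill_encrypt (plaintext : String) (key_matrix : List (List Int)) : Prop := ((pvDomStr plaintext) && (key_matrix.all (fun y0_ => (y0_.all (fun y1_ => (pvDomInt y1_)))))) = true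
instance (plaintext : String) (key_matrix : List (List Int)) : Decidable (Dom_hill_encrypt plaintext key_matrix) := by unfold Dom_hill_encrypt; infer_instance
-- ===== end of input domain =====

-- B separates the work into two plain passes — encrypt the padded letter string block
-- by block, then re-interleave with the non-letters — instead of A's single loop with
-- the matrix multiply and while-padding inlined; objective: simpler. Same return value.

-- ===== PORT A =====

-- string.ascii_uppercase; 'char in string.ascii_uppercase' for a single char is membership here
def pvAsciiUppercase : List Char :=
  ['A','B','C','D','E','F','G','H','I','J','K','L','M','N','O','P','Q','R','S','T','U','V','W','X','Y','Z']

-- A's 'while len(letters) % 3 != 0: letters.append("X")'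
def pvPadX (l : List Char) : List Char :=
  if l.length % 3 ≠ 0 then pvPadX (l ++ ['X']) else l
termination_by (3 - l.length % 3) % 3
decreasing_by simp only [List.length_append, List.length_cons, List.length_nil]; omega

-- literal transliteration of A; letter_idx is the Nat-valued loop counter (it is never
-- negative in Python); list indexing block[i], block_vector[j], key_matrix[i][j] uses
-- getD — inside Pre_ every such index is in range exactly as in Python
def hill_encrypt (plaintext : String) (key_matrix : List (List Int)) : String :=
  let up := PySem.Chars.upper plaintext.toList
  let letters := pvPadX (up.filter (fun c => pvAsciiUppercase.contains c))
  let st := up.foldl (fun (st : List Char × Nat) ch =>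
    if !(pvAsciiUppercase.contains ch) then (st.1 ++ [ch], st.2)
    else if st.2 % 3 == 0 then
      let block := (letters.drop st.2).take 3      -- letters[letter_idx:letter_idx+3]
      let bv := (List.range 3).map (fun i => ((block.getD i 'A').toNat : Int) - 65)
      let ev := (List.range 3).map (fun i =>
        PySem.Int.mod (((List.range 3).map (fun j =>
          (key_matrix.getD i []).getD j 0 * bv.getD j 0)).sum) 26)
      (st.1 ++ ev.map (fun n => Char.ofNat (n + 65).toNat), st.2 + 1)
    else (st.1, st.2 + 1)) ([], 0)
  String.ofList st.1

-- ===== PORT B =====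

-- B's _enc_block: encrypt one 3-letter block
def pvEncBlock3 (key_matrix : List (List Int)) (block : List Char) : List Char :=
  (List.range 3).map (fun i =>
    Char.ofNat ((PySem.Int.mod (((List.range 3).map (fun j =>
      (key_matrix.getD i []).getD j 0 * (((block.getD j 'A').toNat : Int) - 65))).sum) 26) + 65).toNat)

-- B's _enc_all: recurse over the letter string three letters at a time
def pvEncAll (key_matrix : List (List Int)) (letters : List Char) : List Char :=
  if letters = [] then []
  else pvEncBlock3 key_matrix (letters.take 3) ++ pvEncAll key_matrix (letters.drop 3)
termination_by letters.length
decreasing_by rename_i h; cases letters with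
  | nil => exact absurd rfl h
  | cons a t => simp

-- literal transliteration of B (''.join of the collected pieces is flat accumulation)
def hill_encrypt_alt (plaintext : String) (key_matrix : List (List Int)) : String :=
  let up := PySem.Chars.upper plaintext.toList
  let letters0 := up.filter (fun c => pvAsciiUppercase.contains c)
  let letters := letters0 ++ List.replicate (PySem.Int.mod (-(letters0.length : Int)) 3).toNat 'X'
  let enc := pvEncAll key_matrix letters
  let st := up.foldl (fun (st : List Char × Nat) ch =>
    if pvAsciiUppercase.contains ch then
      (if st.2 % 3 == 0 then st.1 ++ (enc.drop st.2).take 3 else st.1, st.2 + 1)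
    else (st.1 ++ [ch], st.2)) ([], 0)
  String.ofList st.1

-- ===== PRECONDITION & SPEC =====
-- Pre_ excludes exactly the inputs on which Python A raises IndexError: a plaintext
-- containing an ASCII letter together with a key_matrix lacking a full 3×3 upper-left block.
def pvIsAsciiLetter (c : Char) : Bool :=
  (65 ≤ c.toNat && c.toNat ≤ 90) || (97 ≤ c.toNat && c.toNat ≤ 122)

def Pre_hill_encrypt (plaintext : String) (key_matrix : List (List Int)) : Prop :=
  (plaintext.toList.all (fun c => !(pvIsAsciiLetter c))) = true ∨
  (3 ≤ key_matrix.length ∧ ((key_matrix.take 3).all (fun r => decide (3 ≤ r.length))) = true)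
instance (plaintext : String) (key_matrix : List (List Int)) : Decidable (Pre_hill_encrypt plaintext key_matrix) := by unfold Pre_hill_encrypt; infer_instance

def pvWitness_hill_encrypt : String × List (List Int) :=
  ("Hi, there!", [[2, 4, 5], [9, 2, 1], [3, 17, 7]])

def Spec_hill_encrypt (plaintext : String) (key_matrix : List (List Int)) (out : String) : Prop := out = hill_encrypt_alt plaintext key_matrix
instance (plaintext : String) (key_matrix : List (List Int)) (out : String) : Decidable (Spec_hill_encrypt plaintext key_matrix out) := by unfold Spec_hill_encrypt; infer_instance

-- ===== CLAIM (what is proved, stated in full; the proofs are below) =====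
def Claim_equal_hill_encrypt : Prop := ∀ (plaintext : String) (key_matrix : List (List Int)), Dom_hill_encrypt plaintext key_matrix → Pre_hill_encrypt plaintext key_matrix → Spec_hill_encrypt plaintext key_matrix (hill_encrypt plaintext key_matrix)

-- ===== LEMMAS AND PROOFS =====

theorem pvPadX_eq (l : List Char) :
    pvPadX l = l ++ List.replicate ((3 - l.length % 3) % 3) 'X' := by
  fun_induction pvPadX l with
  | case1 l h ih =>
      rw [ih]
      have hc : (3 - l.length % 3) % 3 = (3 - (l ++ ['X']).length % 3) % 3 + 1 := by
        simp only [List.length_append, List.length_cons, List.length_nil]; omega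
      rw [hc, List.replicate_succ]
      simp
  | case2 l h =>
      have h0 : l.length % 3 = 0 := by omega
      simp [h0]

theorem pvNegMod_toNat (n : Nat) :
    (PySem.Int.mod (-(n : Int)) 3).toNat = (3 - n % 3) % 3 := by
  have h := PySem.Int.floordiv_mul_add_mod (-(n : Int)) 3
  have h1 := PySem.Int.mod_nonneg (-(n : Int)) (b := 3) (by norm_num)
  have h2 := PySem.Int.mod_lt (-(n : Int)) (b := 3) (by norm_num)
  omega

theorem pvEncBlock3_length (k : List (List Int)) (b : List Char) :
    (pvEncBlock3 k b).length = 3 := by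
  simp [pvEncBlock3]

theorem pvChunk (key : List (List Int)) (k : Nat) (letters : List Char)
    (hmod : letters.length % 3 = 0) (hlt : 3 * k < letters.length) :
    ((pvEncAll key letters).drop (3 * k)).take 3
      = pvEncBlock3 key ((letters.drop (3 * k)).take 3) := by
  induction k generalizing letters with
  | zero =>
      have hne : letters ≠ [] := by intro h; simp [h] at hlt
      rw [pvEncAll, if_neg hne]
      have hb := pvEncBlock3_length key (letters.take 3)
      simp only [Nat.mul_zero, List.drop_zero, List.take_append, hb]
      simp [List.take_of_length_le (by omega : (pvEncBlock3 key (letters.take 3)).length ≤ 3)]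
  | succ k ih =>
      have hne : letters ≠ [] := by intro h; simp [h] at hlt
      have hlen3 : 3 ≤ letters.length := by omega
      rw [pvEncAll, if_neg hne]
      have hb := pvEncBlock3_length key (letters.take 3)
      rw [List.drop_append]
      rw [List.drop_eq_nil_of_le (by omega : (pvEncBlock3 key (letters.take 3)).length ≤ 3 * (k + 1))]
      rw [List.nil_append, hb]
      have h1 : 3 * (k + 1) - 3 = 3 * k := by omega
      have hd1 : (letters.drop 3).length % 3 = 0 := by rw [List.length_drop]; omega
      have hd2 : 3 * k < (letters.drop 3).length := by rw [List.length_drop]; omega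
      rw [h1, ih (letters.drop 3) hd1 hd2]
      rw [List.drop_drop]
      have h2 : 3 * k + 3 = 3 * (k + 1) := by omega
      have h3 : 3 + 3 * k = 3 * (k + 1) := by omega
      first
      | rw [h2]
      | rw [h3]

-- A's inline block encryption at a block start equals the matching slice of B's
-- precomputed cipher string
theorem pvInline (key : List (List Int)) (letters : List Char) (idx : Nat)
    (hmod : letters.length % 3 = 0) (hidx : idx % 3 = 0) (hlt : idx < letters.length) :
    ((List.range 3).map (fun i =>
        PySem.Int.mod (((List.range 3).map (fun j =>
          (key.getD i []).getD j 0 *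
            ((List.range 3).map (fun i => (((((letters.drop idx).take 3).getD i 'A').toNat : Int) - 65))).getD j 0)).sum) 26)).map
      (fun n => Char.ofNat (n + 65).toNat)
      = ((pvEncAll key letters).drop idx).take 3 := by
  obtain ⟨k, rfl⟩ : ∃ k, idx = 3 * k := ⟨idx / 3, by omega⟩
  rw [pvChunk key k letters hmod hlt]
  simp [pvEncBlock3, List.range_succ, List.getD]

theorem pvLoop (key : List (List Int)) (letters : List Char)
    (hmod : letters.length % 3 = 0) :
    ∀ (cs : List Char) (acc : List Char) (idx : Nat),
      idx + cs.countP (fun c => pvAsciiUppercase.contains c) ≤ letters.length →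
      cs.foldl (fun (st : List Char × Nat) ch =>
        if !(pvAsciiUppercase.contains ch) then (st.1 ++ [ch], st.2)
        else if st.2 % 3 == 0 then
          let block := (letters.drop st.2).take 3
          let bv := (List.range 3).map (fun i => ((block.getD i 'A').toNat : Int) - 65)
          let ev := (List.range 3).map (fun i =>
            PySem.Int.mod (((List.range 3).map (fun j =>
              (key.getD i []).getD j 0 * bv.getD j 0)).sum) 26)
          (st.1 ++ ev.map (fun n => Char.ofNat (n + 65).toNat), st.2 + 1)
        else (st.1, st.2 + 1)) (acc, idx)
      = cs.foldl (fun (st : List Char × Nat) ch =>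
          if pvAsciiUppercase.contains ch then
            (if st.2 % 3 == 0 then st.1 ++ ((pvEncAll key letters).drop st.2).take 3 else st.1, st.2 + 1)
          else (st.1 ++ [ch], st.2)) (acc, idx) := by
  intro cs
  induction cs with
  | nil => intro acc idx _; rfl
  | cons c cs ih =>
      intro acc idx hinv
      simp only [List.foldl_cons]
      by_cases hc : pvAsciiUppercase.contains c = true
      · have hcount : (c :: cs).countP (fun c => pvAsciiUppercase.contains c)
            = cs.countP (fun c => pvAsciiUppercase.contains c) + 1 := by
          simp only [List.countP_cons, hc]; rfl
        have e1 : (!pvAsciiUppercase.contains c) = false := by rw [hc]; rfl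
        by_cases hidx : idx % 3 = 0
        · have e2 : (idx % 3 == 0) = true := by simp [hidx]
          rw [e1, hc, e2]
          simp only [Bool.false_eq_true, if_false, if_true]
          rw [pvInline key letters idx hmod hidx (by omega)]
          exact ih _ (idx + 1) (by omega)
        · have e2 : (idx % 3 == 0) = false := by simpa using hidx
          rw [e1, hc, e2]
          simp only [Bool.false_eq_true, if_false, if_true]
          exact ih _ (idx + 1) (by omega)
      · have hcount : (c :: cs).countP (fun c => pvAsciiUppercase.contains c)
            = cs.countP (fun c => pvAsciiUppercase.contains c) := by
          have hc' : pvAsciiUppercase.contains c = false := by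
            revert hc; cases pvAsciiUppercase.contains c <;> simp
          simp only [List.countP_cons, hc']; rfl
        have hc' : pvAsciiUppercase.contains c = false := by
          revert hc; cases pvAsciiUppercase.contains c <;> simp
        have e1 : (!pvAsciiUppercase.contains c) = true := by rw [hc']; rfl
        rw [e1, hc']
        simp only [Bool.false_eq_true, if_false, if_true]
        exact ih _ idx (by omega)

-- ===== VERDICT (by name: the statement is the Claim_ definition above) =====
theorem hill_encrypt_spec : Claim_equal_hill_encrypt := by
  intro plaintext key_matrix _ _
  unfold Spec_hill_encrypt
  simp only [hill_encrypt, hill_encrypt_alt]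
  rw [pvPadX_eq, pvNegMod_toNat]
  refine congrArg String.ofList (congrArg Prod.fst ?_)
  apply pvLoop
  · simp only [List.length_append, List.length_replicate]; omega
  · rw [List.countP_eq_length_filter]
    simp only [List.length_append, List.length_replicate]
    omega
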